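-- pv_equiv track=rewrite | github.com/cry999/AtCoder | beginner/124/A.py | buttons
-- ===== SOURCE A (Python) =====
-- def buttons(A: int, B: int)->int:
--     s = 0
--     for _ in range(2):
--         if A > B:
--             s += A
--             A -= 1
--         else:
--             s += B
--             B -= 1
--     return s
-- ===== SOURCE B (Python) =====
-- def buttons(A: int, B: int) -> int:
--     m = max(A, B)
--     return 2 * m if A == B else 2 * m - 1
-- ===== Notes on version B (the rewrite author's own statement) =====
-- stated objective: simpler
-- what changed: Replaced the two-iteration simulation loop with a closed form: 2*max(A,B), minus 1 unless A == B.
import Mathlib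
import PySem

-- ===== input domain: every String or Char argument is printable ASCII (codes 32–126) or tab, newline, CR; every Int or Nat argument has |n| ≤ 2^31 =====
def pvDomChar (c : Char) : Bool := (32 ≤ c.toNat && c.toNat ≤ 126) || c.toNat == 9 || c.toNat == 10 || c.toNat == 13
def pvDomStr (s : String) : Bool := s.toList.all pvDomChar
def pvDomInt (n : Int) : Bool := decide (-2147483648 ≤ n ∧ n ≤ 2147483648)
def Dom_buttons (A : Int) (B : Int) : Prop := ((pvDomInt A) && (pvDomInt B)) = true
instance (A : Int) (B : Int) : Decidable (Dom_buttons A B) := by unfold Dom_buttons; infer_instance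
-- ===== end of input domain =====

-- B replaces A's two-iteration press-simulation loop with the closed form 2*max(A,B) (- 1 unless A = B); objective: simpler.

-- ===== PORT A =====
-- loop body: one press — add the larger of (a, b) to s and decrement it
def buttonsStep (st : Int × Int × Int) : Int × Int × Int :=
  let (s, a, b) := st
  if a > b then (s + a, a - 1, b) else (s + b, a, b - 1)

def buttons (A : Int) (B : Int) : Int :=
  ((PySem.List.pyRange 0 2 1).foldl (fun st _ => buttonsStep st) (0, A, B)).1

-- ===== PORT B =====
def buttons_alt (A : Int) (B : Int) : Int :=
  let m := max A B
  if A = B then 2 * m else 2 * m - 1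

-- ===== PRECONDITION & SPEC =====
def Spec_buttons (A : Int) (B : Int) (out : Int) : Prop := out = buttons_alt A B
instance (A : Int) (B : Int) (out : Int) : Decidable (Spec_buttons A B out) := by unfold Spec_buttons; infer_instance

-- ===== CLAIM (what is proved, stated in full; the proofs are below) =====
def Claim_equal_buttons : Prop := ∀ (A : Int) (B : Int), Dom_buttons A B → Spec_buttons A B (buttons A B)

-- ===== LEMMAS AND PROOFS =====

-- ===== VERDICT (by name: the statement is the Claim_ definition above) =====
theorem buttons_spec : Claim_equal_buttons := by
  intro A B _
  unfold Spec_buttons buttons buttons_alt buttonsStep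
  simp only [show PySem.List.pyRange 0 2 1 = [0, 1] from by decide, List.foldl]
  rcases lt_trichotomy A B with h | h | h <;>
    simp only [max_def] <;> split_ifs <;> omega
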